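-- pv_equiv track=rewrite | github.com/dongwonmoon/coding_test | 프로그래머스/1/42862. 체육복/체육복.py | solution
-- ===== SOURCE A (Python) =====
-- def solution(n, lost, reserve):
--     real_lost = set(lost) - set(reserve)
--     real_reserve = set(reserve) - set(lost)
--
--     for r in sorted(real_reserve):
--         if r - 1 in real_lost:
--             real_lost.remove(r - 1)
--         elif r + 1 in real_lost:
--             real_lost.remove(r + 1)
--
--     return n - len(real_lost)
-- ===== SOURCE B (Python) =====
-- def solution(n, lost, reserve):
--     ls = sorted(set(lost) - set(reserve))
--     rs = sorted(set(reserve) - set(lost))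
--     i = j = matched = 0
--     while i < len(ls) and j < len(rs):
--         if ls[i] == rs[j] - 1 or ls[i] == rs[j] + 1:
--             matched += 1
--             i += 1
--             j += 1
--         elif ls[i] < rs[j]:
--             i += 1
--         else:
--             j += 1
--     return n - (len(ls) - matched)
-- ===== Notes on version B (the rewrite author's own statement) =====
-- stated objective: alternative
-- what changed: A repeatedly tests and removes r-1/r+1 in a mutable lost-set while iterating the sorted reserves; B instead sorts both deduplicated symmetric-difference lists once and counts matches in a single two-pointer merge sweep, never mutating a set.
import Mathlib
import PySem

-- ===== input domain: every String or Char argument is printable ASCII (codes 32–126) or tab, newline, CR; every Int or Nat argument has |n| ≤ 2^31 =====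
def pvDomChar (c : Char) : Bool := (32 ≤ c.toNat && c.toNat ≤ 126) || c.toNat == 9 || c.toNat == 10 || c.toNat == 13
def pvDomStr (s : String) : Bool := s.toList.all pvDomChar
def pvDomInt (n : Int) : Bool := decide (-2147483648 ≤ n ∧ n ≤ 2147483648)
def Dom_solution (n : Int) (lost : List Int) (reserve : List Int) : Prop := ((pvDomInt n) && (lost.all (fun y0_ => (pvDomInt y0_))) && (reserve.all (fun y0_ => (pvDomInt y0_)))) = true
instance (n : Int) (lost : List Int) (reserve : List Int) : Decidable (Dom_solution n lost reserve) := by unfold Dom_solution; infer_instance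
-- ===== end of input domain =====

-- B replaces A's per-reserve set-membership greedy by a single two-pointer merge sweep over the two
-- sorted deduplicated lists (alternative decomposition; same asymptotic cost, dominated by sorting).

-- ===== PORT A =====
-- loop body of A's 'for r in sorted(real_reserve)' (set.remove under its membership guard)
def pvStep (s : PySem.Set Int) (r : Int) : PySem.Set Int :=
  if (r - 1) ∈ s then (PySem.Set.remove? s (r - 1)).getD s
  else if (r + 1) ∈ s then (PySem.Set.remove? s (r + 1)).getD s
  else s

def solution (n : Int) (lost : List Int) (reserve : List Int) : Int :=
  let realLost : PySem.Set Int := PySem.Set.diff (PySem.Set.ofList lost) (PySem.Set.ofList reserve)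
  let realReserve : PySem.Set Int := PySem.Set.diff (PySem.Set.ofList reserve) (PySem.Set.ofList lost)
  let finalLost := (PySem.List.sorted realReserve (fun x => x) false).foldl pvStep realLost
  n - (finalLost.length : Int)

-- ===== PORT B =====
-- B's 'while i < len(ls) and j < len(rs)' two-pointer loop, as recursion on the index pair;
-- the fuel only totalizes it (each iteration shrinks (len ls - i) + (len rs - j), so
-- len ls + len rs steps always suffice and the guard alone decides termination)
def pvTwoPtr (ls rs : List Int) : Nat → Nat → Nat → Int → Int
  | 0, _, _, matched => matched
  | fuel + 1, i, j, matched =>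
    if h : i < ls.length ∧ j < rs.length then
      if ls[i] = rs[j] - 1 ∨ ls[i] = rs[j] + 1 then
        pvTwoPtr ls rs fuel (i + 1) (j + 1) (matched + 1)
      else if ls[i] < rs[j] then
        pvTwoPtr ls rs fuel (i + 1) j matched
      else
        pvTwoPtr ls rs fuel i (j + 1) matched
    else matched

def solution_alt (n : Int) (lost : List Int) (reserve : List Int) : Int :=
  let ls := PySem.List.sorted (PySem.Set.diff (PySem.Set.ofList lost) (PySem.Set.ofList reserve)) (fun x => x) false
  let rs := PySem.List.sorted (PySem.Set.diff (PySem.Set.ofList reserve) (PySem.Set.ofList lost)) (fun x => x) false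
  let matched := pvTwoPtr ls rs (ls.length + rs.length) 0 0 0
  n - ((ls.length : Int) - matched)

-- ===== PRECONDITION & SPEC =====
def Spec_solution (n : Int) (lost : List Int) (reserve : List Int) (out : Int) : Prop := out = solution_alt n lost reserve
instance (n : Int) (lost : List Int) (reserve : List Int) (out : Int) : Decidable (Spec_solution n lost reserve out) := by unfold Spec_solution; infer_instance

-- ===== CLAIM (what is proved, stated in full; the proofs are below) =====
def Claim_equal_solution : Prop := ∀ (n : Int) (lost : List Int) (reserve : List Int), Dom_solution n lost reserve → Spec_solution n lost reserve (solution n lost reserve)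

-- ===== LEMMAS AND PROOFS =====

-- structural (suffix-based) reading of B's index loop, for the proofs only
def pvTp : List Int → List Int → Int
  | [], _ => 0
  | _ :: _, [] => 0
  | l :: L, r :: R =>
    if l = r - 1 ∨ l = r + 1 then 1 + pvTp L R
    else if l < r then pvTp L (r :: R)
    else pvTp (l :: L) R
termination_by L R => L.length + R.length

lemma pvTp_nil_right (L : List Int) : pvTp L [] = 0 := by cases L <;> simp [pvTp]

lemma pvDiscard_eq_erase (s : List Int) (h : s.Nodup) (x : Int) :
    PySem.Set.discard s x = s.erase x := by
  rw [h.erase_eq_filter x]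
  unfold PySem.Set.discard
  simp [bne]

lemma pvStep_eq (s : PySem.Set Int) (h : s.Nodup) (r : Int) :
    pvStep s r = if (r - 1) ∈ s then s.erase (r - 1)
      else if (r + 1) ∈ s then s.erase (r + 1) else s := by
  unfold pvStep
  split_ifs with h1 h2 <;>
    simp [PySem.Set.remove?_of_mem, pvDiscard_eq_erase s h, *]

lemma pvTwoPtr_eq (ls rs : List Int) (fuel i j : Nat) (m : Int)
    (hk : ls.length - i + (rs.length - j) ≤ fuel) :
    pvTwoPtr ls rs fuel i j m = m + pvTp (ls.drop i) (rs.drop j) := by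
  induction fuel generalizing i j m with
  | zero =>
    rw [pvTwoPtr, List.drop_eq_nil_of_le (by omega : ls.length ≤ i)]
    simp [pvTp]
  | succ k ih =>
    rw [pvTwoPtr]
    by_cases h : i < ls.length ∧ j < rs.length
    · rw [dif_pos h, List.drop_eq_getElem_cons h.1, List.drop_eq_getElem_cons h.2]
      simp only [pvTp]
      split_ifs with c1 c2
      · rw [ih (i + 1) (j + 1) (m + 1) (by omega)]
        ring
      · rw [ih (i + 1) j m (by omega), List.drop_eq_getElem_cons h.2]
      · rw [ih i (j + 1) m (by omega), List.drop_eq_getElem_cons h.1]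
    · rw [dif_neg h]
      rcases Nat.lt_or_ge i ls.length with hi | hi
      · rw [List.drop_eq_nil_of_le (by omega : rs.length ≤ j), pvTp_nil_right]
        ring
      · rw [List.drop_eq_nil_of_le hi]
        simp [pvTp]

lemma pv_fold_erase (l : Int) (R : List Int) (S : PySem.Set Int)
    (hnd : S.Nodup) (hl : l ∈ S) (hR : ∀ r ∈ R, r - 1 ≠ l ∧ r + 1 ≠ l) :
    R.foldl pvStep (S.erase l) = (R.foldl pvStep S).erase l ∧ l ∈ R.foldl pvStep S := by
  induction R generalizing S with
  | nil => exact ⟨rfl, hl⟩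
  | cons r R' ih =>
    have hr := hR r (List.mem_cons_self)
    have hR' : ∀ r' ∈ R', r' - 1 ≠ l ∧ r' + 1 ≠ l := fun r' h' => hR r' (List.mem_cons_of_mem _ h')
    have hm1 : (r - 1) ∈ S.erase l ↔ (r - 1) ∈ S := by
      rw [hnd.mem_erase_iff]
      exact ⟨fun h => h.2, fun h => ⟨hr.1, h⟩⟩
    have hm2 : (r + 1) ∈ S.erase l ↔ (r + 1) ∈ S := by
      rw [hnd.mem_erase_iff]
      exact ⟨fun h => h.2, fun h => ⟨hr.2, h⟩⟩
    simp only [List.foldl_cons]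
    rw [pvStep_eq S hnd, pvStep_eq (S.erase l) (hnd.erase l)]
    by_cases c1 : (r - 1) ∈ S
    · rw [if_pos c1, if_pos (hm1.mpr c1), List.erase_comm]
      exact ih (S.erase (r - 1)) (hnd.erase _)
        ((hnd.mem_erase_iff).mpr ⟨fun he => hr.1 he.symm, hl⟩) hR'
    · rw [if_neg c1, if_neg (fun h => c1 (hm1.mp h))]
      by_cases c2 : (r + 1) ∈ S
      · rw [if_pos c2, if_pos (hm2.mpr c2), List.erase_comm]
        exact ih (S.erase (r + 1)) (hnd.erase _)
          ((hnd.mem_erase_iff).mpr ⟨fun he => hr.2 he.symm, hl⟩) hR'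
      · rw [if_neg c2, if_neg (fun h => c2 (hm2.mp h))]
        exact ih S hnd hl hR'

lemma pv_fold_length (k : Nat) (R L : List Int) (S : PySem.Set Int)
    (hk : L.length + R.length ≤ k)
    (hnd : S.Nodup) (hL : L.Pairwise (· < ·)) (hRp : R.Pairwise (· < ·))
    (hmem : ∀ x, x ∈ S ↔ x ∈ L) (hdisj : ∀ x ∈ L, x ∉ R) :
    ((R.foldl pvStep S).length : Int) = (S.length : Int) - pvTp L R := by
  induction k generalizing R L S with
  | zero =>
    have hR0 : R = [] := List.eq_nil_of_length_eq_zero (by omega)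
    subst hR0
    rw [pvTp_nil_right]
    simp
  | succ k ih =>
    cases R with
    | nil =>
      rw [pvTp_nil_right]
      simp
    | cons r R' =>
      have hrlt : ∀ x ∈ R', r < x := (List.pairwise_cons.mp hRp).1
      have hRp' := (List.pairwise_cons.mp hRp).2
      cases L with
      | nil =>
        have hSemp : ∀ x, x ∉ S := fun x hx => by simpa using (hmem x).mp hx
        have hstep : pvStep S r = S := by
          rw [pvStep_eq S hnd, if_neg (hSemp _), if_neg (hSemp _)]
        simp only [List.foldl_cons, hstep]
        rw [ih R' [] S (by simp at hk ⊢; omega) hnd hL hRp' hmem (fun x hx => absurd hx (List.not_mem_nil))]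
        simp [pvTp]
      | cons lmin L' =>
        have hlt : ∀ x ∈ L', lmin < x := (List.pairwise_cons.mp hL).1
        have hL' := (List.pairwise_cons.mp hL).2
        have hlr : lmin ≠ r := fun he =>
          hdisj lmin List.mem_cons_self (he ▸ List.mem_cons_self)
        have hmemL : ∀ x, x ∈ S ↔ x = lmin ∨ x ∈ L' := by
          intro x; rw [hmem x]; simp
        have hlS : lmin ∈ S := (hmemL lmin).mpr (Or.inl rfl)
        have hndE := hnd.erase lmin
        have hmemE : ∀ x, x ∈ S.erase lmin ↔ x ∈ L' := by
          intro x
          rw [hnd.mem_erase_iff]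
          constructor
          · rintro ⟨hne, hxS⟩
            rcases (hmemL x).mp hxS with h | h
            · exact absurd h hne
            · exact h
          · intro hx
            exact ⟨ne_of_gt (hlt x hx), (hmemL x).mpr (Or.inr hx)⟩
        have hlenE : ((S.erase lmin).length : Int) = (S.length : Int) - 1 := by
          have h1 := List.length_erase_of_mem hlS
          have h2 := List.length_pos_of_mem hlS
          omega
        have hdisj' : ∀ x ∈ L', x ∉ R' := fun x hx hxR =>
          hdisj x (List.mem_cons_of_mem _ hx) (List.mem_cons_of_mem _ hxR)
        have hdisjR : ∀ x ∈ L', x ∉ r :: R' := fun x hx =>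
          hdisj x (List.mem_cons_of_mem _ hx)
        by_cases c1 : lmin = r - 1
        · have hstep : pvStep S r = S.erase lmin := by
            rw [pvStep_eq S hnd, if_pos (c1 ▸ hlS), ← c1]
          simp only [List.foldl_cons, hstep]
          rw [ih R' L' (S.erase lmin) (by simp at hk ⊢; omega) hndE hL' hRp' hmemE hdisj']
          rw [hlenE]
          simp only [pvTp]
          rw [if_pos (Or.inl c1)]
          ring
        · by_cases c2 : lmin = r + 1
          · have hnm : (r - 1) ∉ S := by
              intro hm
              rcases (hmemL _).mp hm with h | h
              · omega
              · have := hlt _ h; omega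
            have hstep : pvStep S r = S.erase lmin := by
              rw [pvStep_eq S hnd, if_neg hnm, if_pos (c2 ▸ hlS), ← c2]
            simp only [List.foldl_cons, hstep]
            rw [ih R' L' (S.erase lmin) (by simp at hk ⊢; omega) hndE hL' hRp' hmemE hdisj']
            rw [hlenE]
            simp only [pvTp]
            rw [if_pos (Or.inr c2)]
            ring
          · by_cases c3 : lmin < r
            · have hadj : ∀ r' ∈ r :: R', r' - 1 ≠ lmin ∧ r' + 1 ≠ lmin := by
                intro r' hr'
                rcases List.mem_cons.mp hr' with h | h
                · subst h; omega
                · have := hrlt _ h; omega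
              obtain ⟨heq, hmemF⟩ := pv_fold_erase lmin (r :: R') S hnd hlS hadj
              have hlen2 : (((r :: R').foldl pvStep S).length : Int)
                  = (((r :: R').foldl pvStep (S.erase lmin)).length : Int) + 1 := by
                have h1 := List.length_erase_of_mem hmemF
                have h2 := List.length_pos_of_mem hmemF
                rw [heq]
                omega
              have hrec := ih (r :: R') L' (S.erase lmin) (by simp at hk ⊢; omega)
                hndE hL' hRp hmemE hdisjR
              have htp : pvTp (lmin :: L') (r :: R') = pvTp L' (r :: R') := by
                simp only [pvTp]
                rw [if_neg (by push Not; omega), if_pos c3]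
              rw [htp, hlen2, hrec, hlenE]
              ring
            · have hgt : r + 1 < lmin := by omega
              have hge : ∀ x ∈ S, lmin ≤ x := by
                intro x hx
                rcases (hmemL x).mp hx with h | h
                · omega
                · have := hlt _ h; omega
              have h1 : (r - 1) ∉ S := fun hm => by have := hge _ hm; omega
              have h2 : (r + 1) ∉ S := fun hm => by have := hge _ hm; omega
              have hstep : pvStep S r = S := by
                rw [pvStep_eq S hnd, if_neg h1, if_neg h2]
              simp only [List.foldl_cons, hstep]
              rw [ih R' (lmin :: L') S (by simp at hk ⊢; omega) hnd hL hRp' hmem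
                (fun x hx hxR => hdisj x hx (List.mem_cons_of_mem _ hxR))]
              have htp : pvTp (lmin :: L') (r :: R') = pvTp (lmin :: L') R' := by
                simp only [pvTp]
                rw [if_neg (by push Not; omega), if_neg c3]
              rw [htp]

lemma pv_pairwise_lt {l : List Int} (hnd : l.Nodup) (hle : l.Pairwise (· ≤ ·)) :
    l.Pairwise (· < ·) :=
  (hle.and hnd).imp (fun h => lt_of_le_of_ne h.1 h.2)

-- ===== VERDICT (by name: the statement is the Claim_ definition above) =====
theorem solution_spec : Claim_equal_solution := by
  intro n lost reserve _
  unfold Spec_solution solution solution_alt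
  dsimp only
  set S : PySem.Set Int := PySem.Set.diff (PySem.Set.ofList lost) (PySem.Set.ofList reserve) with hS
  set T : PySem.Set Int := PySem.Set.diff (PySem.Set.ofList reserve) (PySem.Set.ofList lost) with hT
  set ls := PySem.List.sorted S (fun x => x) false with hls
  set rs := PySem.List.sorted T (fun x => x) false with hrs
  have hSnd : S.Nodup := PySem.Set.nodup_diff _ _ (PySem.Set.nodup_ofList _)
  have hTnd : T.Nodup := PySem.Set.nodup_diff _ _ (PySem.Set.nodup_ofList _)
  have hlsnd : ls.Nodup := ((PySem.List.sorted_perm S (fun x => x) false).symm.nodup hSnd)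
  have hrsnd : rs.Nodup := ((PySem.List.sorted_perm T (fun x => x) false).symm.nodup hTnd)
  have hlp : ls.Pairwise (· < ·) := pv_pairwise_lt hlsnd (PySem.List.sorted_pairwise S (fun x => x))
  have hrp : rs.Pairwise (· < ·) := pv_pairwise_lt hrsnd (PySem.List.sorted_pairwise T (fun x => x))
  have hmem : ∀ x, x ∈ S ↔ x ∈ ls := fun x => (PySem.List.mem_sorted S (fun x => x) false x).symm
  have hdisj : ∀ x ∈ ls, x ∉ rs := by
    intro x hx hx'
    have h1 : x ∈ S := (hmem x).mpr hx
    have h2 : x ∈ T := (PySem.List.mem_sorted T (fun x => x) false x).mp hx'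
    rw [hS, PySem.Set.mem_diff] at h1
    rw [hT, PySem.Set.mem_diff] at h2
    exact h1.2 (by simpa [PySem.Set.mem_ofList] using h2.1)
  have hlen : ls.length = S.length := PySem.List.length_sorted S (fun x => x) false
  have hfold := pv_fold_length (ls.length + rs.length) rs ls S (le_refl _)
    hSnd hlp hrp hmem hdisj
  rw [pvTwoPtr_eq ls rs (ls.length + rs.length) 0 0 0 (by omega)]
  simp only [List.drop_zero] at *
  rw [hfold]
  rw [hlen]
  ring
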